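-- pv_equiv track=rewrite | github.com/Vaunorage/ClearBias | test5.py | get_tuple_from_multi_set_rank
-- ===== SOURCE A (Python) =====
-- def max_rank(sets):
--     total_combinations = 1
--     for s in sets:
--         total_combinations *= len(s)
--     return total_combinations
--
-- def get_tuple_from_multi_set_rank(sets, rank):
--     total_combinations = max_rank(sets)
--     if rank >= total_combinations:
--         raise ValueError("Rank is out of the allowable range (0 to total_combinations - 1)")
--
--     indices = []
--     for i in range(len(sets) - 1, -1, -1):
--         size = len(sets[i])
--         index = rank % size
--         indices.insert(0, index)
--         rank //= size
--
--     result_tuple = tuple(sets[i][indices[i]] for i in range(len(sets)))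
--     return result_tuple
-- ===== SOURCE B (Python) =====
-- def max_rank(sets):
--     total_combinations = 1
--     for s in sets:
--         total_combinations *= len(s)
--     return total_combinations
--
--
-- def get_tuple_from_multi_set_rank(sets, rank):
--     # suffix-product weights: weights[i] = product of len(sets[j]) for j > i
--     weights = []
--     total = 1
--     for s in reversed(sets):
--         weights.append(total)
--         total *= len(s)
--     weights.reverse()
--
--     if rank >= total:
--         raise ValueError("Rank is out of the allowable range (0 to total_combinations - 1)")
--
--     return tuple(s[(rank // w) % len(s)] for s, w in zip(sets, weights))
-- ===== Notes on version B (the rewrite author's own statement) =====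
-- stated objective: alternative
-- what changed: Instead of A's backward loop that destructively divides rank and prepends indices into a list that is then re-read by position, B precomputes the suffix-product weights in one backward pass and then computes each position's index independently as (rank // weight) % size in a single forward zip.
import Mathlib
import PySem

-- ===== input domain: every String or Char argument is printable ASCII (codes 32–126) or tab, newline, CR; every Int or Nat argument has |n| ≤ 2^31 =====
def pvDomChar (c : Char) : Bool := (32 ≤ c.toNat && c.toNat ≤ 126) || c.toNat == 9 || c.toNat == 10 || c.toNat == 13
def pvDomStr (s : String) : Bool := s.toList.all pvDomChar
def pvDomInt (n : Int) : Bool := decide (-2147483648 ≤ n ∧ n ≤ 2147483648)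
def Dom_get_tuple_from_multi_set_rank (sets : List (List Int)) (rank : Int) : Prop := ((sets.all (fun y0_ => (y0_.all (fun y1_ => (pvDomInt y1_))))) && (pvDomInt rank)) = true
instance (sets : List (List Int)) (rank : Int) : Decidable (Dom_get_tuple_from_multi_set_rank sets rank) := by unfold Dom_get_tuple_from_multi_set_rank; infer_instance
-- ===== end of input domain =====

-- B replaces A's destructive divide-and-prepend loop by suffix-product weights and
-- independent per-position indices (rank // weight) % size; objective: alternative decomposition.

-- ===== PORT A =====
def max_rank (sets : List (List Int)) : Int :=
  sets.foldl (fun total s => total * (s.length : Int)) 1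

def get_tuple_from_multi_set_rank (sets : List (List Int)) (rank : Int) : List Int :=
  let total := max_rank sets
  if rank ≥ total then []   -- raise ValueError (excluded by Pre_)
  else
    -- for i in range(len(sets)-1, -1, -1): index = rank % size; indices.insert(0, index); rank //= size
    let st := sets.reverse.foldl
      (fun (st : Int × List Int) s =>
        (PySem.Int.floordiv st.1 (s.length : Int),
         PySem.Int.mod st.1 (s.length : Int) :: st.2))
      (rank, [])
    -- tuple(sets[i][indices[i]] for i in range(len(sets)))  (in range under Pre_)
    (PySem.List.pyRange 0 (sets.length : Int) 1).map (fun i =>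
      PySem.List.pyGetD (PySem.List.pyGetD sets i []) (PySem.List.pyGetD st.2 i 0) 0)

-- ===== PORT B =====
def get_tuple_from_multi_set_rank_alt (sets : List (List Int)) (rank : Int) : List Int :=
  -- backward pass building (total, weights): weights[i] = product of len(sets[j]) for j > i
  let wt := sets.foldr
    (fun s (st : Int × List Int) => ((s.length : Int) * st.1, st.1 :: st.2))
    (1, [])
  if rank ≥ wt.1 then []   -- raise ValueError (excluded by Pre_)
  else
    (sets.zip wt.2).map (fun p =>
      PySem.List.pyGetD p.1
        (PySem.Int.mod (PySem.Int.floordiv rank p.2) (p.1.length : Int)) 0)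

-- ===== PRECONDITION & SPEC =====
-- Pre_ = exactly the inputs where A returns: rank below the number of combinations (else ValueError)
-- and every set nonempty (an empty set with negative rank hits `rank % 0`, ZeroDivisionError).
def Pre_get_tuple_from_multi_set_rank (sets : List (List Int)) (rank : Int) : Prop :=
  (∀ s ∈ sets, s ≠ []) ∧ rank < (sets.map (fun s => (s.length : Int))).prod
instance (sets : List (List Int)) (rank : Int) : Decidable (Pre_get_tuple_from_multi_set_rank sets rank) := by unfold Pre_get_tuple_from_multi_set_rank; infer_instance

def pvWitness_get_tuple_from_multi_set_rank : List (List Int) × Int := ([[10, 20], [30, 40, 50]], 4)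

def Spec_get_tuple_from_multi_set_rank (sets : List (List Int)) (rank : Int) (out : List Int) : Prop := out = get_tuple_from_multi_set_rank_alt sets rank
instance (sets : List (List Int)) (rank : Int) (out : List Int) : Decidable (Spec_get_tuple_from_multi_set_rank sets rank out) := by unfold Spec_get_tuple_from_multi_set_rank; infer_instance

-- ===== CLAIM (what is proved, stated in full; the proofs are below) =====
def Claim_equal_get_tuple_from_multi_set_rank : Prop := ∀ (sets : List (List Int)) (rank : Int), Dom_get_tuple_from_multi_set_rank sets rank → Pre_get_tuple_from_multi_set_rank sets rank → Spec_get_tuple_from_multi_set_rank sets rank (get_tuple_from_multi_set_rank sets rank)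

-- ===== LEMMAS AND PROOFS =====

-- the loop step of A
def pvStepA (st : Int × List Int) (s : List Int) : Int × List Int :=
  (PySem.Int.floordiv st.1 (s.length : Int),
   PySem.Int.mod st.1 (s.length : Int) :: st.2)

-- B's foldr state: (product of lengths, suffix-product weights)
lemma wt_fst (sets : List (List Int)) :
    (sets.foldr (fun s (st : Int × List Int) => ((s.length : Int) * st.1, st.1 :: st.2)) (1, [])).1
      = (sets.map (fun s => (s.length : Int))).prod := by
  induction sets with
  | nil => simp
  | cons s rest ih => simp [List.foldr_cons, ih]

lemma maxRank_eq (sets : List (List Int)) :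
    max_rank sets = (sets.map (fun s => (s.length : Int))).prod := by
  rw [max_rank, List.prod_eq_foldl, ← List.foldl_map]

lemma prod_pos (sets : List (List Int)) (h : ∀ s ∈ sets, s ≠ []) :
    0 < (sets.map (fun s => (s.length : Int))).prod := by
  induction sets with
  | nil => simp
  | cons s rest ih =>
    have hs : s ≠ [] := h s (by simp)
    have : 0 < (s.length : Int) := by
      have := List.length_pos_iff.mpr hs; exact_mod_cast this
    have := ih (fun t ht => h t (by simp [ht]))
    simpa using mul_pos ‹0 < (s.length : Int)› this

-- rank after consuming sets (reversed) is rank // (product of lengths)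
lemma foldl_stepA_fst (sets : List (List Int)) (r : Int) (h : ∀ s ∈ sets, s ≠ []) :
    (sets.reverse.foldl pvStepA (r, [])).1
      = PySem.Int.floordiv r (sets.map (fun s => (s.length : Int))).prod := by
  induction sets generalizing r with
  | nil => simp [PySem.Int.floordiv]
  | cons s rest ih =>
    have hrest : ∀ t ∈ rest, t ≠ [] := fun t ht => h t (by simp [ht])
    have hs : 0 < (s.length : Int) := by
      have := List.length_pos_iff.mpr (h s (by simp)); exact_mod_cast this
    have hp : 0 < (rest.map (fun s => (s.length : Int))).prod := prod_pos rest hrest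
    simp only [List.reverse_cons, List.foldl_append, List.foldl_cons, List.foldl_nil]
    have := ih r hrest
    -- one more step on the state after rest.reverse
    have hstep : (pvStepA (rest.reverse.foldl pvStepA (r, [])) s).1
        = PySem.Int.floordiv ((rest.reverse.foldl pvStepA (r, [])).1) (s.length : Int) := rfl
    rw [hstep, this, List.map_cons, List.prod_cons]
    rw [PySem.Int.floordiv_eq_ediv_of_pos hp, PySem.Int.floordiv_eq_ediv_of_pos hs,
        PySem.Int.floordiv_eq_ediv_of_pos (mul_pos hs hp)]
    rw [Int.ediv_ediv_of_nonneg (le_of_lt hp), mul_comm]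

-- the indices list, head first
lemma foldl_stepA_cons (s : List Int) (rest : List (List Int)) (r : Int)
    (h : ∀ t ∈ rest, t ≠ []) :
    ((s :: rest).reverse.foldl pvStepA (r, [])).2
      = PySem.Int.mod (PySem.Int.floordiv r (rest.map (fun t => (t.length : Int))).prod)
          (s.length : Int)
        :: (rest.reverse.foldl pvStepA (r, [])).2 := by
  simp only [List.reverse_cons, List.foldl_append, List.foldl_cons, List.foldl_nil]
  have hstep : pvStepA (rest.reverse.foldl pvStepA (r, [])) s
      = (PySem.Int.floordiv ((rest.reverse.foldl pvStepA (r, [])).1) (s.length : Int),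
         PySem.Int.mod ((rest.reverse.foldl pvStepA (r, [])).1) (s.length : Int)
           :: (rest.reverse.foldl pvStepA (r, [])).2) := rfl
  rw [hstep, foldl_stepA_fst rest r h]

lemma foldl_stepA_len (sets : List (List Int)) (r : Int) :
    ((sets.reverse.foldl pvStepA (r, [])).2).length = sets.length := by
  induction sets generalizing r with
  | nil => simp
  | cons s rest ih =>
    simp only [List.reverse_cons, List.foldl_append, List.foldl_cons, List.foldl_nil]
    have : (pvStepA (rest.reverse.foldl pvStepA (r, [])) s).2
        = PySem.Int.mod ((rest.reverse.foldl pvStepA (r, [])).1) (s.length : Int)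
          :: (rest.reverse.foldl pvStepA (r, [])).2 := rfl
    rw [this]
    simp only [List.length_cons]
    rw [ih r]

-- A's gather over range = zipWith over (sets, indices) when lengths agree
lemma gather_eq_zipWith (sets : List (List Int)) (idx : List Int)
    (hlen : idx.length = sets.length) :
    (PySem.List.pyRange 0 (sets.length : Int) 1).map (fun i =>
        PySem.List.pyGetD (PySem.List.pyGetD sets i []) (PySem.List.pyGetD idx i 0) 0)
      = List.zipWith (fun s j => PySem.List.pyGetD s j 0) sets idx := by
  rw [PySem.List.pyRange_zero_natCast]
  rw [List.map_map]
  apply List.ext_getElem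
  · simp [hlen]
  · intro n h1 h2
    simp only [List.getElem_map, List.getElem_range, Function.comp_apply,
      List.getElem_zipWith]
    have hn : n < sets.length := by simpa using h1
    rw [PySem.List.pyGetD_natCast, PySem.List.pyGetD_natCast]
    rw [List.getD_eq_getElem sets [] hn, List.getD_eq_getElem idx 0 (by omega)]

-- core: zipWith over A's indices = B's forward map, by left induction
lemma core_eq (sets : List (List Int)) (r : Int) (h : ∀ s ∈ sets, s ≠ []) :
    List.zipWith (fun s j => PySem.List.pyGetD s j 0) sets
        ((sets.reverse.foldl pvStepA (r, [])).2)
      = (sets.zip (sets.foldr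
            (fun s (st : Int × List Int) => ((s.length : Int) * st.1, st.1 :: st.2))
            (1, [])).2).map (fun p =>
          PySem.List.pyGetD p.1
            (PySem.Int.mod (PySem.Int.floordiv r p.2) (p.1.length : Int)) 0) := by
  induction sets with
  | nil => simp
  | cons s rest ih =>
    have hrest : ∀ t ∈ rest, t ≠ [] := fun t ht => h t (by simp [ht])
    rw [foldl_stepA_cons s rest r hrest]
    simp only [List.foldr_cons, List.zip_cons_cons, List.map_cons, List.zipWith_cons_cons]
    rw [ih hrest, wt_fst]

-- ===== VERDICT (by name: the statement is the Claim_ definition above) =====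
theorem get_tuple_from_multi_set_rank_spec : Claim_equal_get_tuple_from_multi_set_rank := by
  intro sets rank _hdom hpre
  obtain ⟨hne, hlt⟩ := hpre
  unfold Spec_get_tuple_from_multi_set_rank
  unfold get_tuple_from_multi_set_rank get_tuple_from_multi_set_rank_alt
  simp only
  rw [maxRank_eq, wt_fst]
  rw [if_neg (by omega), if_neg (by omega)]
  have hfold : (sets.reverse.foldl
      (fun (st : Int × List Int) s =>
        (PySem.Int.floordiv st.1 (s.length : Int),
         PySem.Int.mod st.1 (s.length : Int) :: st.2)) (rank, []))
      = sets.reverse.foldl pvStepA (rank, []) := rfl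
  rw [hfold]
  rw [gather_eq_zipWith sets _ (foldl_stepA_len sets rank)]
  exact core_eq sets rank hne
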